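-- pv_equiv track=rewrite | github.com/ak2k2/Connect-Four-Alpha-Beta-AI | connect_four.py | count_shapes
-- ===== SOURCE A (Python) =====
-- IN_A_ROW = 4  # Number of pieces in a row needed to win
--
-- def count_shapes(board, player):
--     N, M = len(board), len(board[0])
--     l_count, plus_count = 0, 0
--
--     # Check for L shape in various subgrid sizes
--     def check_l_shape(subgrid):
--         # Check each corner for L shape
--         corners = [(0, 0), (0, -1), (-1, 0), (-1, -1)]
--         for corner in corners:
--             if all(
--                 subgrid[corner[0]][i] == player for i in range(len(subgrid))
--             ) and all(subgrid[i][corner[1]] == player for i in range(len(subgrid))):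
--                 return True
--         return False
--
--     # Check for plus shape in 3x3 subgrid
--     def check_plus_shape(i, j):
--         return all(board[i + 1][j + k] == player for k in range(3)) and all(
--             board[i + k][j + 1] == player for k in range(3)
--         )
--
--     # Check for L shapes
--     for size in range(2, IN_A_ROW):
--         for i in range(N - size + 1):
--             for j in range(M - size + 1):
--                 subgrid = [row[j : j + size] for row in board[i : i + size]]
--                 if check_l_shape(subgrid):
--                     l_count += 1 * size
--
--     # Check for plus shapes
--     for i in range(N - 2):
--         for j in range(M - 2):
--             if check_plus_shape(i, j):
--                 plus_count += 1
--
--     return int(l_count + plus_count)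
-- ===== SOURCE B (Python) =====
-- IN_A_ROW = 4  # Number of pieces in a row needed to win
--
--
-- def _runs(cells, player):
--     # out[k] = length of the run of `player` cells starting at k going right
--     out = [0] * len(cells)
--     run = 0
--     for k in range(len(cells) - 1, -1, -1):
--         run = run + 1 if cells[k] == player else 0
--         out[k] = run
--     return out
--
--
-- def count_shapes(board, player):
--     N, M = len(board), len(board[0])
--     H = [_runs(row, player) for row in board]
--     cols = [[board[i][j] for i in range(N)] for j in range(M)]
--     V = [_runs(col, player) for col in cols]
--     total = 0
--     # L shapes: a full edge row (top or bottom) and a full edge column (left or right)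
--     for size in range(2, IN_A_ROW):
--         for i in range(N - size + 1):
--             for j in range(M - size + 1):
--                 if (H[i][j] >= size or H[i + size - 1][j] >= size) and (
--                     V[j][i] >= size or V[j + size - 1][i] >= size
--                 ):
--                     total += size
--     # plus shapes
--     for i in range(N - 2):
--         for j in range(M - 2):
--             if H[i + 1][j] >= 3 and V[j + 1][i] >= 3:
--                 total += 1
--     return total
-- ===== Notes on version B (the rewrite author's own statement) =====
-- stated objective: faster
-- what changed: Replaces per-cell subgrid copying and four-corner rescans with two run-length tables (rightward and downward runs) built in one backward pass each, so every L-shape and plus-shape test becomes a constant number of table lookups.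
-- outside the precondition, e.g. on count_shapes([[0, 0], [0]], 1): A returns 0, B raises IndexError; on count_shapes([[1, 1], [1]], 1): A returns 2, B raises IndexError
import Mathlib
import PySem

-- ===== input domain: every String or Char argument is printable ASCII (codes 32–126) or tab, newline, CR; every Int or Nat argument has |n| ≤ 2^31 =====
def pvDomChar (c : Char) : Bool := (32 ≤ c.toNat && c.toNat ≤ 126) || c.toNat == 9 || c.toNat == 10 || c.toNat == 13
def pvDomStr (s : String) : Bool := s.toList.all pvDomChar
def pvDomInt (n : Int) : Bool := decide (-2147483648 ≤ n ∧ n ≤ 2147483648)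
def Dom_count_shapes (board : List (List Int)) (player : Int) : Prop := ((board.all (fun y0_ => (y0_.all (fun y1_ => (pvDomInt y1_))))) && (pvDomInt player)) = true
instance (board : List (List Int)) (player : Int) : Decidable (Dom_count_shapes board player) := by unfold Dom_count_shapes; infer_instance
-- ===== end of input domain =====

-- B replaces A's per-cell subgrid copying and four-corner rescans with two run-length
-- tables (rightward and downward runs), making each shape test a few table lookups
-- (objective: faster, constant-factor).

-- ===== PORT A =====
def pvCheckL (subgrid : List (List Int)) (player : Int) : Bool :=
  ([((0:Int),(0:Int)), (0,-1), (-1,0), (-1,-1)]).any (fun c =>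
    ((List.range subgrid.length).all fun t =>
        PySem.List.pyGetD (PySem.List.pyGetD subgrid c.1 []) (t : Int) 0 == player) &&
    ((List.range subgrid.length).all fun t =>
        PySem.List.pyGetD (PySem.List.pyGetD subgrid (t : Int) []) c.2 0 == player))

def pvCheckPlus (board : List (List Int)) (player : Int) (i j : Int) : Bool :=
  ((List.range 3).all fun k =>
      PySem.List.pyGetD (PySem.List.pyGetD board (i + 1) []) (j + (k : Int)) 0 == player) &&
  ((List.range 3).all fun k =>
      PySem.List.pyGetD (PySem.List.pyGetD board (i + (k : Int)) []) (j + 1) 0 == player)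

def count_shapes (board : List (List Int)) (player : Int) : Int :=
  let N : Int := board.length
  let M : Int := ((PySem.List.pyGet? board 0).getD []).length
  let l : Int := (PySem.List.pyRange 2 4 1).foldl (fun acc size =>
    (PySem.List.pyRange 0 (N - size + 1) 1).foldl (fun acc i =>
      (PySem.List.pyRange 0 (M - size + 1) 1).foldl (fun acc j =>
        let subgrid := (PySem.List.slice board (some i) (some (i + size))).map
          (fun row => PySem.List.slice row (some j) (some (j + size)))
        if pvCheckL subgrid player then acc + 1 * size else acc) acc) acc) 0
  let p : Int := (PySem.List.pyRange 0 (N - 2) 1).foldl (fun acc i =>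
    (PySem.List.pyRange 0 (M - 2) 1).foldl (fun acc j =>
      if pvCheckPlus board player i j then acc + 1 else acc) acc) 0
  l + p

-- ===== PORT B =====
-- out[k] = length of the run of `player` cells starting at k (backward pass of Source B's _runs)
def pvRuns (player : Int) : List Int → List Int
  | [] => []
  | x :: xs =>
      let r := pvRuns player xs
      (if x == player then r.headD 0 + 1 else 0) :: r

def count_shapes_alt (board : List (List Int)) (player : Int) : Int :=
  let N : Int := board.length
  let M : Int := ((PySem.List.pyGet? board 0).getD []).length
  let H : List (List Int) := board.map (pvRuns player)
  let cols : List (List Int) := (PySem.List.pyRange 0 M 1).map (fun j =>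
      (PySem.List.pyRange 0 N 1).map (fun i =>
        PySem.List.pyGetD (PySem.List.pyGetD board i []) j 0))
  let V : List (List Int) := cols.map (pvRuns player)
  let Hq : Int → Int → Int := fun i j => PySem.List.pyGetD (PySem.List.pyGetD H i []) j 0
  let Vq : Int → Int → Int := fun j i => PySem.List.pyGetD (PySem.List.pyGetD V j []) i 0
  let t1 : Int := (PySem.List.pyRange 2 4 1).foldl (fun acc size =>
    (PySem.List.pyRange 0 (N - size + 1) 1).foldl (fun acc i =>
      (PySem.List.pyRange 0 (M - size + 1) 1).foldl (fun acc j =>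
        if (size ≤ Hq i j ∨ size ≤ Hq (i + size - 1) j) ∧
           (size ≤ Vq j i ∨ size ≤ Vq (j + size - 1) i) then acc + size else acc) acc) acc) 0
  (PySem.List.pyRange 0 (N - 2) 1).foldl (fun acc i =>
    (PySem.List.pyRange 0 (M - 2) 1).foldl (fun acc j =>
      if 3 ≤ Hq (i + 1) j ∧ 3 ≤ Vq (j + 1) i then acc + 1 else acc) acc) t1

-- ===== PRECONDITION & SPEC =====
-- Pre_ excludes the empty board (A raises IndexError on board[0]) and boards with a
-- row shorter than the first row, on which A raises IndexError or returns an accidental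
-- value depending on the cell values; B (which builds full column lists) raises there.
def Pre_count_shapes (board : List (List Int)) (player : Int) : Prop :=
  board ≠ [] ∧ ∀ row ∈ board, (board.headD []).length ≤ row.length
instance (board : List (List Int)) (player : Int) : Decidable (Pre_count_shapes board player) := by
  unfold Pre_count_shapes; infer_instance
def pvWitness_count_shapes : List (List Int) × Int := ([[0]], 0)

def Spec_count_shapes (board : List (List Int)) (player : Int) (out : Int) : Prop := out = count_shapes_alt board player
instance (board : List (List Int)) (player : Int) (out : Int) : Decidable (Spec_count_shapes board player out) := by unfold Spec_count_shapes; infer_instance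

-- ===== CLAIM (what is proved, stated in full; the proofs are below) =====
def Claim_equal_count_shapes : Prop := ∀ (board : List (List Int)) (player : Int), Dom_count_shapes board player → Pre_count_shapes board player → Spec_count_shapes board player (count_shapes board player)

-- ===== LEMMAS AND PROOFS =====

-- cell/row/column predicates the two sides are bridged through
def pvCellP (board : List (List Int)) (p : Int) (r c : Nat) : Prop :=
  (board.getD r []).getD c (p + 1) = p
def pvRowP (board : List (List Int)) (p : Int) (r c s : Nat) : Prop :=
  ∀ t, t < s → pvCellP board p r (c + t)
def pvColP (board : List (List Int)) (p : Int) (r c s : Nat) : Prop :=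
  ∀ t, t < s → pvCellP board p (r + t) c

theorem pvRuns_nonneg (p : Int) (cells : List Int) : ∀ k, 0 ≤ (pvRuns p cells).getD k 0 := by
  induction cells with
  | nil => intro k; simp [pvRuns]
  | cons x xs ih =>
      intro k
      cases k with
      | zero =>
          simp only [pvRuns, List.getD_cons_zero]
          split
          · cases hE : pvRuns p xs with
            | nil => simp
            | cons y ys =>
                have := ih 0
                simp [hE] at this ⊢
                omega
          · omega
      | succ k' => simpa [pvRuns] using ih k'

theorem pvRuns_ge (p : Int) (cells : List Int) :
    ∀ (k s : Nat), ((s : Int) ≤ (pvRuns p cells).getD k 0) ↔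
      (∀ t, t < s → cells.getD (k + t) (p + 1) = p) := by
  induction cells with
  | nil =>
      intro k s
      constructor
      · intro h t ht
        simp [pvRuns] at h
        omega
      · intro h
        rcases Nat.eq_zero_or_pos s with hs | hs
        · simp [hs, pvRuns]
        · have := h 0 hs
          simp at this
  | cons x xs ih =>
      intro k s
      cases k with
      | succ k' =>
          simp only [pvRuns, List.getD_cons_succ]
          simpa [Nat.succ_add] using ih k' s
      | zero =>
          have hval : (pvRuns p (x :: xs)).getD 0 0
              = if x = p then (pvRuns p xs).getD 0 0 + 1 else 0 := by
            simp only [pvRuns, List.getD_cons_zero, beq_iff_eq]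
            split <;> [skip; rfl]
            cases pvRuns p xs <;> simp
          rw [hval]
          by_cases hx : x = p
          · simp only [hx]
            cases s with
            | zero =>
                simp only [Nat.cast_zero]
                constructor
                · intro _ t ht; omega
                · intro _
                  have := pvRuns_nonneg p xs 0
                  omega
            | succ s' =>
                have hIH := ih 0 s'
                constructor
                · intro h t ht
                  cases t with
                  | zero => simp [← hx]
                  | succ t' =>
                      have h2 : (s' : Int) ≤ (pvRuns p xs).getD 0 0 := by push_cast at h ⊢; omega
                      have := hIH.1 h2 t' (by omega)
                      simpa [Nat.succ_add, Nat.add_comm] using this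
                · intro h
                  have h2 : (s' : Int) ≤ (pvRuns p xs).getD 0 0 := by
                    apply hIH.2
                    intro t ht
                    have := h (t + 1) (by omega)
                    simpa [Nat.succ_add] using this
                  push_cast
                  omega
          · rw [if_neg hx]
            constructor
            · intro h t ht
              exfalso
              have hs0 : s = 0 := by
                by_contra hs
                have : (1 : Int) ≤ (s : Int) := by
                  have : 1 ≤ s := by omega
                  exact_mod_cast this
                omega
              omega
            · intro h
              rcases Nat.eq_zero_or_pos s with hs | hs
              · simp [hs]
              · exfalso
                have := h 0 hs
                simp at this
                exact hx this

theorem getD_map_pvRuns (p : Int) (l : List (List Int)) (a : Nat) :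
    (l.map (pvRuns p)).getD a [] = pvRuns p (l.getD a []) := by
  simp only [List.getD_eq_getElem?_getD, List.getElem?_map]
  cases l[a]? <;> simp [pvRuns]

theorem Hq_iff (board : List (List Int)) (p : Int) (a b s : Nat) :
    ((s : Int) ≤ PySem.List.pyGetD
        (PySem.List.pyGetD (board.map (pvRuns p)) (a : Int) []) (b : Int) 0)
      ↔ pvRowP board p a b s := by
  rw [PySem.List.pyGetD_natCast, PySem.List.pyGetD_natCast, getD_map_pvRuns]
  exact pvRuns_ge p _ b s

theorem col_term_iff (board : List (List Int)) (p : Int) (M0 : Nat)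
    (hrect : ∀ row ∈ board, M0 ≤ row.length) (b : Nat) (hb : b < M0) (r : Nat) :
    (((List.range board.length).map (fun k => (board.getD k []).getD b 0)).getD r (p + 1) = p)
      ↔ pvCellP board p r b := by
  unfold pvCellP
  by_cases hr : r < board.length
  · rw [PySem.List.getD_map_range _ _ _ _ hr]
    have hrow : board.getD r [] = board[r] := List.getD_eq_getElem _ _ hr
    have hlen : M0 ≤ (board.getD r []).length := by
      rw [hrow]; exact hrect _ (List.getElem_mem hr)
    have hblt : b < (board.getD r []).length := by omega
    rw [List.getD_eq_getElem _ 0 hblt, List.getD_eq_getElem _ (p + 1) hblt]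
  · have h0 : board.getD r [] = [] := List.getD_eq_default _ _ (by omega)
    rw [List.getD_eq_default _ _ (by simpa using (by omega : board.length ≤ r)), h0]
    simp

theorem Vq_iff (board : List (List Int)) (p : Int) (M0 : Nat)
    (hrect : ∀ row ∈ board, M0 ≤ row.length) (a b s : Nat) (hb : b < M0) :
    ((s : Int) ≤ PySem.List.pyGetD (PySem.List.pyGetD
        (((PySem.List.pyRange 0 (M0 : Int) 1).map (fun j =>
            (PySem.List.pyRange 0 (board.length : Int) 1).map (fun i =>
              PySem.List.pyGetD (PySem.List.pyGetD board i []) j 0))).map (pvRuns p))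
        (b : Int) []) (a : Int) 0)
      ↔ pvColP board p a b s := by
  rw [PySem.List.pyGetD_natCast, PySem.List.pyGetD_natCast, getD_map_pvRuns]
  have hcols : ((PySem.List.pyRange 0 (M0 : Int) 1).map (fun j =>
      (PySem.List.pyRange 0 (board.length : Int) 1).map (fun i =>
        PySem.List.pyGetD (PySem.List.pyGetD board i []) j 0))).getD b []
      = (List.range board.length).map (fun k => (board.getD k []).getD b 0) := by
    simp only [PySem.List.pyRange_zero_natCast, List.map_map]
    rw [PySem.List.getD_map_range _ _ _ _ hb]
    simp [Function.comp_def, PySem.List.pyGetD_natCast]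
  rw [hcols, pvRuns_ge]
  unfold pvColP
  refine forall_congr' (fun t => imp_congr_right (fun ht => ?_))
  exact col_term_iff board p M0 hrect b hb (a + t)

theorem cell_d_iff (board : List (List Int)) (p : Int) (M0 : Nat)
    (hrect : ∀ row ∈ board, M0 ≤ row.length) (r c : Nat)
    (hr : r < board.length) (hc : c < M0) (d : Int) :
    ((board.getD r []).getD c d = p) ↔ pvCellP board p r c := by
  unfold pvCellP
  have hrow : board.getD r [] = board[r] := List.getD_eq_getElem _ _ hr
  have hlen : M0 ≤ (board.getD r []).length := by
    rw [hrow]; exact hrect _ (List.getElem_mem hr)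
  have hclt : c < (board.getD r []).length := by omega
  rw [List.getD_eq_getElem _ d hclt, List.getD_eq_getElem _ (p + 1) hclt]

set_option maxHeartbeats 1000000 in
theorem checkL_iff (board : List (List Int)) (p : Int) (M0 : Nat)
    (hrect : ∀ row ∈ board, M0 ≤ row.length)
    (a b s : Nat) (hs : 2 ≤ s) (ha : a + s ≤ board.length) (hb : b + s ≤ M0) :
    (pvCheckL ((PySem.List.slice board (some (a : Int)) (some ((a : Int) + (s : Int)))).map
        (fun row => PySem.List.slice row (some (b : Int)) (some ((b : Int) + (s : Int))))) p = true)
      ↔ ((pvRowP board p a b s ∨ pvRowP board p (a + s - 1) b s) ∧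
         (pvColP board p a b s ∨ pvColP board p a (b + s - 1) s)) := by
  have hG : ((PySem.List.slice board (some (a : Int)) (some ((a : Int) + (s : Int)))).map
        (fun row => PySem.List.slice row (some (b : Int)) (some ((b : Int) + (s : Int)))))
      = ((board.drop a).take s).map (fun row => (row.drop b).take s) := by
    simp only [PySem.List.slice_natCast_add]
  rw [hG]
  set G := ((board.drop a).take s).map (fun row => (row.drop b).take s) with hGdef
  have hGlen : G.length = s := by
    rw [hGdef]; simp; omega
  have hGget : ∀ u, u < s → G.getD u [] = ((board.getD (a + u) []).drop b).take s := by
    intro u hu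
    rw [hGdef]
    simp only [List.getD_eq_getElem?_getD, List.getElem?_map, List.getElem?_take,
      List.getElem?_drop, if_pos hu]
    rw [List.getElem?_eq_getElem (show a + u < board.length by omega)]
    simp
  have hrowlen : ∀ u, u < s → (G.getD u []).length = s := by
    intro u hu
    rw [hGget u hu]
    have : M0 ≤ (board.getD (a + u) []).length := by
      rw [List.getD_eq_getElem _ _ (show a + u < board.length by omega)]
      exact hrect _ (List.getElem_mem (by omega))
    rw [List.length_take, List.length_drop]
    omega
  have hcell : ∀ u t (d : Int), u < s → t < s →
      (((G.getD u []).getD t d = p) ↔ pvCellP board p (a + u) (b + t)) := by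
    intro u t d hu ht
    have hrlen : M0 ≤ (board.getD (a + u) []).length := by
      rw [List.getD_eq_getElem _ _ (show a + u < board.length by omega)]
      exact hrect _ (List.getElem_mem (by omega))
    have h2 : (G.getD u []).getD t d = (board.getD (a + u) []).getD (b + t) 0 := by
      rw [hGget u hu]
      simp only [List.getD_eq_getElem?_getD, List.getElem?_take, List.getElem?_drop, if_pos ht]
      change (board.getD (a + u) []).getD (b + t) d = (board.getD (a + u) []).getD (b + t) 0
      have hbt : b + t < (board.getD (a + u) []).length := by omega
      rw [List.getD_eq_getElem _ d hbt, List.getD_eq_getElem _ 0 hbt]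
    rw [h2]
    exact cell_d_iff board p M0 hrect (a + u) (b + t) (by omega) (by omega) 0
  have hGne : G ≠ [] := by
    intro h; rw [h] at hGlen; simp at hGlen; omega
  have hneg : PySem.List.pyGetD G (-1) [] = G.getD (s - 1) [] := by
    rw [PySem.List.pyGetD_neg_one _ _ hGne, List.getLast_eq_getElem]
    rw [List.getD_eq_getElem _ [] (show s - 1 < G.length by omega)]
    congr 1
    omega
  have hzero : PySem.List.pyGetD G 0 [] = G.getD 0 [] := PySem.List.pyGetD_zero _ _
  have hR0 : (∀ t, t < s → (G.getD 0 []).getD t (0:Int) = p) ↔ pvRowP board p a b s := by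
    unfold pvRowP
    refine forall_congr' (fun t => imp_congr_right (fun ht => ?_))
    simpa using hcell 0 t 0 (by omega) ht
  have hR1 : (∀ t, t < s → (G.getD (s - 1) []).getD t (0:Int) = p) ↔ pvRowP board p (a + s - 1) b s := by
    unfold pvRowP
    refine forall_congr' (fun t => imp_congr_right (fun ht => ?_))
    rw [hcell (s - 1) t 0 (by omega) ht]
    have he : a + (s - 1) = a + s - 1 := by omega
    rw [he]
  have hC0 : (∀ t, t < s → PySem.List.pyGetD (G.getD t []) 0 (0:Int) = p) ↔ pvColP board p a b s := by
    unfold pvColP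
    refine forall_congr' (fun t => imp_congr_right (fun ht => ?_))
    rw [PySem.List.pyGetD_zero]
    simpa using hcell t 0 0 ht (by omega)
  have hC1 : (∀ t, t < s → PySem.List.pyGetD (G.getD t []) (-1) (0:Int) = p) ↔ pvColP board p a (b + s - 1) s := by
    unfold pvColP
    refine forall_congr' (fun t => imp_congr_right (fun ht => ?_))
    have hne : G.getD t [] ≠ [] := by
      intro h
      have := hrowlen t ht
      rw [h] at this; simp at this; omega
    rw [PySem.List.pyGetD_neg_one _ _ hne, List.getLast_eq_getElem]
    simp only [hrowlen t ht]
    rw [← List.getD_eq_getElem _ (0:Int) (show s - 1 < (G.getD t []).length by rw [hrowlen t ht]; omega)]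
    rw [hcell t (s - 1) 0 ht (by omega)]
    have he : b + (s - 1) = b + s - 1 := by omega
    rw [he]
  simp only [pvCheckL, List.any_cons, List.any_nil, Bool.or_false, Bool.or_eq_true,
    Bool.and_eq_true, List.all_eq_true, List.mem_range, beq_iff_eq, hGlen,
    PySem.List.pyGetD_natCast, hneg, hzero]
  rw [hR0, hR1, hC0, hC1]
  tauto

theorem plus_iff (board : List (List Int)) (p : Int) (M0 : Nat)
    (hrect : ∀ row ∈ board, M0 ≤ row.length) (a b : Nat)
    (ha : a + 3 ≤ board.length) (hb : b + 3 ≤ M0) :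
    (pvCheckPlus board p (a : Int) (b : Int) = true)
      ↔ (pvRowP board p (a + 1) b 3 ∧ pvColP board p a (b + 1) 3) := by
  simp only [pvCheckPlus, Bool.and_eq_true, List.all_eq_true, List.mem_range, beq_iff_eq,
    ← Nat.cast_add_one, ← Nat.cast_add, PySem.List.pyGetD_natCast]
  constructor
  · rintro ⟨h1, h2⟩
    constructor
    · intro t ht
      rw [← cell_d_iff board p M0 hrect (a + 1) (b + t) (by omega) (by omega) 0]
      exact h1 t ht
    · intro t ht
      rw [← cell_d_iff board p M0 hrect (a + t) (b + 1) (by omega) (by omega) 0]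
      exact h2 t ht
  · rintro ⟨h1, h2⟩
    constructor
    · intro t ht
      rw [cell_d_iff board p M0 hrect (a + 1) (b + t) (by omega) (by omega) 0]
      exact h1 t ht
    · intro t ht
      rw [cell_d_iff board p M0 hrect (a + t) (b + 1) (by omega) (by omega) 0]
      exact h2 t ht

theorem foldl_shift {α : Type} (l : List α) (w : Int → α → Int)
    (h : ∀ c x, w c x = c + w 0 x) : ∀ init, l.foldl w init = init + l.foldl w 0 := by
  induction l with
  | nil => intro init; simp
  | cons x xs ih =>
      intro init
      simp only [List.foldl_cons]
      rw [ih (w init x), ih (w 0 x), h init x]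
      ring

-- ===== VERDICT (by name: the statement is the Claim_ definition above) =====
set_option maxHeartbeats 2000000 in
theorem count_shapes_spec : Claim_equal_count_shapes := by
  intro board player hDom hPre
  unfold Spec_count_shapes
  obtain ⟨hne, hrect⟩ := hPre
  cases board with
  | nil => exact absurd rfl hne
  | cons r0 rest =>
    simp only [List.headD_cons] at hrect
    simp only [count_shapes, count_shapes_alt, PySem.List.pyGet?_zero_cons, Option.getD_some]
    set bd : List (List Int) := r0 :: rest with hbd
    set N : Int := (bd.length : Int) with hN
    set M : Int := (r0.length : Int) with hM
    -- part 1: the L-shape loops agree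
    have hL : (PySem.List.pyRange 2 4 1).foldl (fun acc size =>
        (PySem.List.pyRange 0 (N - size + 1) 1).foldl (fun acc i =>
          (PySem.List.pyRange 0 (M - size + 1) 1).foldl (fun acc j =>
            if pvCheckL ((PySem.List.slice bd (some i) (some (i + size))).map
                (fun row => PySem.List.slice row (some j) (some (j + size)))) player
            then acc + 1 * size else acc) acc) acc) 0
        = (PySem.List.pyRange 2 4 1).foldl (fun acc size =>
        (PySem.List.pyRange 0 (N - size + 1) 1).foldl (fun acc i =>
          (PySem.List.pyRange 0 (M - size + 1) 1).foldl (fun acc j =>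
            if (size ≤ PySem.List.pyGetD (PySem.List.pyGetD (bd.map (pvRuns player)) i []) j 0 ∨
                size ≤ PySem.List.pyGetD (PySem.List.pyGetD (bd.map (pvRuns player)) (i + size - 1) []) j 0) ∧
               (size ≤ PySem.List.pyGetD (PySem.List.pyGetD
                  (((PySem.List.pyRange 0 M 1).map (fun j' =>
                    (PySem.List.pyRange 0 N 1).map (fun i' =>
                      PySem.List.pyGetD (PySem.List.pyGetD bd i' []) j' 0))).map (pvRuns player)) j []) i 0 ∨
                size ≤ PySem.List.pyGetD (PySem.List.pyGetD
                  (((PySem.List.pyRange 0 M 1).map (fun j' =>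
                    (PySem.List.pyRange 0 N 1).map (fun i' =>
                      PySem.List.pyGetD (PySem.List.pyGetD bd i' []) j' 0))).map (pvRuns player)) (j + size - 1) []) i 0)
            then acc + size else acc) acc) acc) 0 := by
      apply PySem.List.foldl_congr_mem
      intro acc0 size hsize
      rw [PySem.List.mem_pyRange_one] at hsize
      apply PySem.List.foldl_congr_mem
      intro acc1 i hi
      rw [PySem.List.mem_pyRange_one] at hi
      apply PySem.List.foldl_congr_mem
      intro acc2 j hj
      rw [PySem.List.mem_pyRange_one] at hj
      obtain ⟨s, rfl⟩ : ∃ s : Nat, size = (s : Int) :=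
        ⟨size.toNat, (Int.toNat_of_nonneg (by omega)).symm⟩
      obtain ⟨a, rfl⟩ : ∃ a : Nat, i = (a : Int) :=
        ⟨i.toNat, (Int.toNat_of_nonneg (by omega)).symm⟩
      obtain ⟨b, rfl⟩ : ∃ b : Nat, j = (b : Int) :=
        ⟨j.toNat, (Int.toNat_of_nonneg (by omega)).symm⟩
      have hs2 : 2 ≤ s := by omega
      have haN : a + s ≤ bd.length := by omega
      have hbM : b + s ≤ r0.length := by omega
      have hA := checkL_iff bd player r0.length hrect a b s hs2 haN hbM
      have h1 := Hq_iff bd player a b s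
      rw [show ((a : Int) + (s : Int) - 1) = ((a + s - 1 : Nat) : Int) by omega,
          show ((b : Int) + (s : Int) - 1) = ((b + s - 1 : Nat) : Int) by omega]
      have h2 := Hq_iff bd player (a + s - 1) b s
      have h3 := Vq_iff bd player r0.length hrect a b s (by omega)
      have h4 := Vq_iff bd player r0.length hrect a (b + s - 1) s (by omega)
      rw [← hM, ← hN] at h3 h4
      exact if_congr ((and_congr (or_congr h1 h2) (or_congr h3 h4)).trans hA.symm).symm
        (by ring) rfl
    rw [hL]
    -- part 2: shift the plus-loop's initial accumulator out
    have hw : ∀ (c : Int) (i : Int),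
        (fun (acc : Int) (i : Int) => (PySem.List.pyRange 0 (M - 2) 1).foldl (fun acc j =>
          if 3 ≤ PySem.List.pyGetD (PySem.List.pyGetD (bd.map (pvRuns player)) (i + 1) []) j 0 ∧
             3 ≤ PySem.List.pyGetD (PySem.List.pyGetD
                (((PySem.List.pyRange 0 M 1).map (fun j' =>
                  (PySem.List.pyRange 0 N 1).map (fun i' =>
                    PySem.List.pyGetD (PySem.List.pyGetD bd i' []) j' 0))).map (pvRuns player)) (j + 1) []) i 0
          then acc + 1 else acc) acc) c i
        = c + (fun (acc : Int) (i : Int) => (PySem.List.pyRange 0 (M - 2) 1).foldl (fun acc j =>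
          if 3 ≤ PySem.List.pyGetD (PySem.List.pyGetD (bd.map (pvRuns player)) (i + 1) []) j 0 ∧
             3 ≤ PySem.List.pyGetD (PySem.List.pyGetD
                (((PySem.List.pyRange 0 M 1).map (fun j' =>
                  (PySem.List.pyRange 0 N 1).map (fun i' =>
                    PySem.List.pyGetD (PySem.List.pyGetD bd i' []) j' 0))).map (pvRuns player)) (j + 1) []) i 0
          then acc + 1 else acc) acc) 0 i := by
      intro c i
      simp only []
      rw [foldl_shift _ _ (by intro c' x; split <;> ring) c]
    rw [foldl_shift _ _ hw]
    congr 1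
    -- part 3: the plus-shape loops agree
    apply PySem.List.foldl_congr_mem
    intro acc1 i hi
    rw [PySem.List.mem_pyRange_one] at hi
    apply PySem.List.foldl_congr_mem
    intro acc2 j hj
    rw [PySem.List.mem_pyRange_one] at hj
    obtain ⟨a, rfl⟩ : ∃ a : Nat, i = (a : Int) :=
      ⟨i.toNat, (Int.toNat_of_nonneg (by omega)).symm⟩
    obtain ⟨b, rfl⟩ : ∃ b : Nat, j = (b : Int) :=
      ⟨j.toNat, (Int.toNat_of_nonneg (by omega)).symm⟩
    have haN : a + 3 ≤ bd.length := by omega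
    have hbM : b + 3 ≤ r0.length := by omega
    have hA := plus_iff bd player r0.length hrect a b haN hbM
    rw [show ((a : Int) + 1) = ((a + 1 : Nat) : Int) by omega,
        show ((b : Int) + 1) = ((b + 1 : Nat) : Int) by omega]
    have h1 := Hq_iff bd player (a + 1) b 3
    have h2 := Vq_iff bd player r0.length hrect a (b + 1) 3 (by omega)
    rw [← hM, ← hN] at h2
    rw [show ((3 : Nat) : Int) = (3 : Int) from rfl] at h1 h2
    exact if_congr ((and_congr h1 h2).trans hA.symm).symm rfl rfl
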